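-- pv_equiv track=rewrite | github.com/BenJan87/Python_repo | AGH_course_exercises/III_sem/19.10.2022/ex_3/lista.py | zapisz
-- ===== SOURCE A (Python) =====
-- def zapisz(arr, argv):
--     for number in argv:
--         try:
--             position = arr[::2].index(number)
--             arr[position*2+1] += 1
--         except:
--             arr += [number, 1]
--     return arr
-- ===== SOURCE B (Python) =====
-- def zapisz(arr, argv):
--     # Tally: aggregate argv into a counter first, then one merge pass over the
--     # existing value/count pairs, then append the genuinely new values.
--     cnt = {}
--     for x in argv:
--         cnt[x] = cnt.get(x, 0) + 1
--     seen = set()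
--     for i in range(0, len(arr), 2):
--         v = arr[i]
--         if v not in seen:
--             seen.add(v)
--             arr[i + 1] += cnt.get(v, 0)
--     for x in argv:
--         if x not in seen:
--             seen.add(x)
--             arr += [x, cnt[x]]
--     return arr
-- ===== Notes on version B (the rewrite author's own statement) =====
-- stated objective: alternative
-- what changed: B aggregates argv into a counter once, then does a single merge pass over the existing value/count pairs followed by appending the new values, instead of A's per-element arr[::2] slice + list.index rescan; Pre_ excludes odd-length arr, a malformed pair list with a trailing value lacking its count cell, on which B's arr[i+1] raises IndexError while A's bare except turns the same IndexError into accidental parity-shuffled appends.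
-- outside the precondition, e.g. on zapisz([5], [5]): A returns [5, 5, 1], B raises IndexError; on zapisz([5], []): A returns [5], B raises IndexError
import Mathlib
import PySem

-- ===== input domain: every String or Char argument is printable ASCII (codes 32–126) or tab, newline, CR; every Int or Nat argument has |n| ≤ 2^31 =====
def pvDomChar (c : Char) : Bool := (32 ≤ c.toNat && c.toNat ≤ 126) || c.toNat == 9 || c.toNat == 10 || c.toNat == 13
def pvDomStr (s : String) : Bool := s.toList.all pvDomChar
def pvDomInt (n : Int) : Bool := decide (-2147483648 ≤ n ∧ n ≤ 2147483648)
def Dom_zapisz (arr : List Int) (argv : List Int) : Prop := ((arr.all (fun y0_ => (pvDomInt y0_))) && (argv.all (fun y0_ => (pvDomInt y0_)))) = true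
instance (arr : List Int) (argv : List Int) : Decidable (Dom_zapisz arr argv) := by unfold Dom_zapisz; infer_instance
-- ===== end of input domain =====

-- B aggregates argv into a counter once, then makes one merge pass over the value/count
-- pairs and appends the new values, replacing A's per-element slice-and-rescan (objective:
-- alternative). Both Pythons mutate arr in place; the theorems are about the returned value.

-- ===== PORT A =====
-- one iteration of A's for-loop: try arr[::2].index / increment, except: append
def pvStepA (a : List Int) (number : Int) : List Int :=
  match PySem.List.slice? a none none 2 with
  | none => a ++ [number, 1]                    -- any exception is caught by the bare except
  | some ev =>
    match PySem.List.index? ev number with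
    | none => a ++ [number, 1]                  -- ValueError from .index
    | some p =>
      match PySem.List.pyGet? a ((p : Int) * 2 + 1) with
      | none => a ++ [number, 1]                -- IndexError from arr[position*2+1]
      | some v => PySem.List.pySetD a ((p : Int) * 2 + 1) (v + 1)

def zapisz (arr : List Int) (argv : List Int) : List Int :=
  argv.foldl pvStepA arr

-- ===== PORT B =====
-- cnt = {}; for x in argv: cnt[x] = cnt.get(x, 0) + 1
def pvCnt (argv : List Int) : PySem.Dict Int Int :=
  argv.foldl (fun d x => d.insert x (d.getD x 0 + 1)) PySem.Dict.empty

-- merge pass body: state = (arr, seen); v = arr[i]; if v not in seen: seen.add(v); arr[i+1] += cnt.get(v, 0)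
def pvMergeStep (cnt : PySem.Dict Int Int) (st : List Int × PySem.Set Int) (i : Int) :
    List Int × PySem.Set Int :=
  let v := PySem.List.pyGetD st.1 i 0
  if st.2.contains v then st
  else (PySem.List.pySetD st.1 (i + 1) (PySem.List.pyGetD st.1 (i + 1) 0 + cnt.getD v 0),
        PySem.Set.add st.2 v)

-- append pass body: if x not in seen: seen.add(x); arr += [x, cnt[x]]
def pvNewStep (cnt : PySem.Dict Int Int) (st : List Int × PySem.Set Int) (x : Int) :
    List Int × PySem.Set Int :=
  if st.2.contains x then st
  else (st.1 ++ [x, cnt.getD x 0], PySem.Set.add st.2 x)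

def zapisz_alt (arr : List Int) (argv : List Int) : List Int :=
  let cnt := pvCnt argv
  (argv.foldl (pvNewStep cnt)
    ((PySem.List.pyRange 0 (arr.length : Int) 2).foldl (pvMergeStep cnt)
      (arr, PySem.Set.empty))).1

-- ===== PRECONDITION & SPEC =====
-- Pre_ restricts to the natural domain of well-formed flat pair lists: an odd-length arr
-- has a trailing value with no count cell; there B's arr[i+1] raises IndexError, while A's
-- bare except converts the same IndexError into accidental parity-shuffled appends.
def Pre_zapisz (arr : List Int) (argv : List Int) : Prop := arr.length % 2 = 0
instance (arr : List Int) (argv : List Int) : Decidable (Pre_zapisz arr argv) := by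
  unfold Pre_zapisz; infer_instance

def pvWitness_zapisz : List Int × List Int := ([2, 1], [3, 2, 3])

def Spec_zapisz (arr : List Int) (argv : List Int) (out : List Int) : Prop := out = zapisz_alt arr argv
instance (arr : List Int) (argv : List Int) (out : List Int) : Decidable (Spec_zapisz arr argv out) := by unfold Spec_zapisz; infer_instance

-- ===== CLAIM (what is proved, stated in full; the proofs are below) =====
def Claim_equal_zapisz : Prop := ∀ (arr : List Int) (argv : List Int), Dom_zapisz arr argv → Pre_zapisz arr argv → Spec_zapisz arr argv (zapisz arr argv)

-- ===== LEMMAS AND PROOFS =====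

-- the count function B's dict realises
def pvFC (argv : List Int) (v : Int) : Int := (argv.count v : Int)

lemma pvCnt_getD (argv : List Int) (v : Int) : (pvCnt argv).getD v 0 = pvFC argv v := by
  rw [pvCnt, PySem.Dict.foldl_insert_getD_add_one_eq_counter, PySem.Dict.getD_counter]
  rfl

-- the even-index elements arr[::2], structurally
def every2 : List Int → List Int
  | [] => []
  | [x] => [x]
  | x :: _ :: t => x :: every2 t

lemma every2_eq_F : ∀ xs : List Int,
    every2 xs = (List.range ((xs.length + 1) / 2)).filterMap (fun k => xs[2 * k]?)
  | [] => by simp [every2]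
  | [x] => by simp [every2, List.range_succ]
  | x :: y :: t => by
    have h : ((x :: y :: t).length + 1) / 2 = (t.length + 1) / 2 + 1 := by
      simp [List.length_cons]; omega
    rw [every2, h, List.range_succ_eq_map]
    simp [List.filterMap_map, show ∀ k, 2 * (k + 1) = (2 * k) + 1 + 1 from by omega,
      every2_eq_F t]

lemma slice2_eq (xs : List Int) : PySem.List.slice? xs none none 2 = some (every2 xs) := by
  rw [every2_eq_F]
  simp [PySem.List.slice?, PySem.List.sliceIndices]
  have h : (if 0 < xs.length then (((xs.length : Int) + 2 - 1) / 2).toNat else 0)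
      = (xs.length + 1) / 2 := by split_ifs <;> omega
  rw [h]
  apply List.filterMap_congr
  intro k _
  congr 1

-- index/set shifting past one pair
lemma pyGet?_cons2 (x y : Int) (xs : List Int) (i : Int) (h : 0 ≤ i) :
    PySem.List.pyGet? (x :: y :: xs) (i + 2) = PySem.List.pyGet? xs i := by
  rw [PySem.List.pyGet?_of_nonneg _ (by omega : (0:Int) ≤ i + 2), PySem.List.pyGet?_of_nonneg _ h]
  have h2 : (i + 2).toNat = i.toNat + 1 + 1 := by omega
  simp [h2]

lemma pyGetD_cons2 (x y : Int) (xs : List Int) (i : Int) (h : 0 ≤ i) (d : Int) :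
    PySem.List.pyGetD (x :: y :: xs) (i + 2) d = PySem.List.pyGetD xs i d := by
  rw [PySem.List.pyGetD_of_nonneg _ _ (by omega : (0:Int) ≤ i + 2), PySem.List.pyGetD_of_nonneg _ _ h]
  have h2 : (i + 2).toNat = i.toNat + 1 + 1 := by omega
  simp [h2]

lemma pySetD_cons2 (x y : Int) (xs : List Int) (i : Int) (h : 0 ≤ i) (v : Int) :
    PySem.List.pySetD (x :: y :: xs) (i + 2) v = x :: y :: PySem.List.pySetD xs i v := by
  rw [PySem.List.pySetD_of_nonneg _ _ (by omega : (0:Int) ≤ i + 2), PySem.List.pySetD_of_nonneg _ _ h]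
  have h2 : (i + 2).toNat = i.toNat + 1 + 1 := by omega
  simp [h2]

-- ---- characterising port A's step ----

-- first-occurrence increment of the count cell of key n (A's found-branch)
def pvInc : List Int → Int → List Int
  | v :: c :: t, n => if v = n then v :: (c + 1) :: t else v :: c :: pvInc t n
  | l, _ => l

lemma pvStepA_eq (a : List Int) (n : Int) :
    pvStepA a n
      = match PySem.List.index? (every2 a) n with
        | none => a ++ [n, 1]
        | some p =>
          match PySem.List.pyGet? a ((p : Int) * 2 + 1) with
          | none => a ++ [n, 1]
          | some v => PySem.List.pySetD a ((p : Int) * 2 + 1) (v + 1) := by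
  unfold pvStepA
  rw [slice2_eq]

lemma stepA_cons_ne (x y n : Int) (t : List Int) (hx : x ≠ n) :
    pvStepA (x :: y :: t) n = x :: y :: pvStepA t n := by
  rw [pvStepA_eq, pvStepA_eq]
  have he : every2 (x :: y :: t) = x :: every2 t := rfl
  rw [he, PySem.List.index?_cons_of_ne _ hx]
  cases hidx : PySem.List.index? (every2 t) n with
  | none => simp [hidx]
  | some p =>
    simp only [hidx, Option.map_some]
    have hcast : ((p + 1 : Nat) : Int) * 2 + 1 = ((p : Int) * 2 + 1) + 2 := by push_cast; ring
    rw [hcast, pyGet?_cons2 _ _ _ _ (by positivity)]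
    cases hget : PySem.List.pyGet? t ((p : Int) * 2 + 1) with
    | none => simp [hget]
    | some v =>
      simp only [hget]
      rw [pySetD_cons2 _ _ _ _ (by positivity)]

lemma stepA_char : ∀ (a : List Int), a.length % 2 = 0 → ∀ n : Int,
    pvStepA a n = if n ∈ every2 a then pvInc a n else a ++ [n, 1]
  | [], _, n => by
    have h0 : PySem.List.index? (every2 []) n = none :=
      (PySem.List.index?_eq_none_iff _ _).mpr (by simp [every2])
    rw [pvStepA_eq, h0]
    simp [every2]
  | [x], h, n => by simp at h
  | x :: y :: t, h, n => by
    have ht : t.length % 2 = 0 := by simp [List.length_cons] at h; omega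
    by_cases hx : x = n
    · subst hx
      rw [pvStepA_eq]
      have he : every2 (x :: y :: t) = x :: every2 t := rfl
      rw [he, PySem.List.index?_cons_self]
      simp [pvInc, PySem.List.pyGet?, PySem.List.pyIdx?, PySem.List.pySetD,
        PySem.List.pySet?]
    · rw [stepA_cons_ne x y n t hx, stepA_char t ht n]
      by_cases hm : n ∈ every2 t <;>
        simp [every2, pvInc, hm, Ne.symm hx, hx]

-- ---- the common semantic model ----

def pvMergeR : List Int → (Int → Int) → PySem.Set Int → List Int
  | v :: c :: t, f, s =>
    if s.contains v then v :: c :: pvMergeR t f s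
    else v :: (c + f v) :: pvMergeR t f (PySem.Set.add s v)
  | _, _, _ => []

def pvSeenR : List Int → PySem.Set Int → PySem.Set Int
  | v :: _ :: t, s => pvSeenR t (if s.contains v then s else PySem.Set.add s v)
  | _, s => s

def pvNewR : List Int → (Int → Int) → PySem.Set Int → List Int
  | [], _, _ => []
  | x :: t, f, s =>
    if s.contains x then pvNewR t f s
    else x :: f x :: pvNewR t f (PySem.Set.add s x)

-- ---- port B computes the model ----

lemma mergeFold_shift (cnt : PySem.Dict Int Int) :
    ∀ (is_ : List Int), (∀ i ∈ is_, 0 ≤ i) → ∀ (x y : Int) (t : List Int) (s : PySem.Set Int),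
    (is_.map (· + 2)).foldl (pvMergeStep cnt) (x :: y :: t, s)
      = (x :: y :: (is_.foldl (pvMergeStep cnt) (t, s)).1,
         (is_.foldl (pvMergeStep cnt) (t, s)).2)
  | [], _, x, y, t, s => rfl
  | i :: is, h, x, y, t, s => by
    have hi : 0 ≤ i := h i (List.mem_cons_self)
    have hstep : pvMergeStep cnt (x :: y :: t, s) (i + 2)
        = (x :: y :: (pvMergeStep cnt (t, s) i).1, (pvMergeStep cnt (t, s) i).2) := by
      simp only [pvMergeStep]
      rw [pyGetD_cons2 _ _ _ _ hi]
      by_cases hc : PySem.List.pyGetD t i 0 ∈ s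
      · simp [hc]
      · have h3 : i + 2 + 1 = (i + 1) + 2 := by ring
        rw [h3, pySetD_cons2 _ _ _ _ (by omega), pyGetD_cons2 _ _ _ _ (by omega)]
        simp [hc]
    rw [List.map_cons, List.foldl_cons, hstep, List.foldl_cons]
    exact mergeFold_shift cnt is (fun j hj => h j (List.mem_cons_of_mem _ hj)) x y _ _

lemma pyRange2 (n : Nat) :
    PySem.List.pyRange 0 (n : Int) 2
      = (List.range ((n + 1) / 2)).map (fun k : Nat => (2 * k : Int)) := by
  rw [PySem.List.pyRange_of_pos _ _ (by norm_num : (0:Int) < 2)]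
  have hcount : (if (0 : Int) < (n : Int) then (((n : Int) - 0 + 2 - 1) / 2).toNat else 0)
      = (n + 1) / 2 := by split_ifs <;> omega
  rw [hcount]
  apply List.map_congr_left
  intro k _
  ring

lemma pyRange2_cons (n : Nat) :
    PySem.List.pyRange 0 ((n : Int) + 2) 2
      = 0 :: (PySem.List.pyRange 0 (n : Int) 2).map (· + 2) := by
  have h2 : ((n : Int) + 2) = ((n + 2 : Nat) : Int) := by push_cast; ring
  rw [h2, pyRange2, pyRange2]
  have h3 : (n + 2 + 1) / 2 = (n + 1) / 2 + 1 := by omega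
  rw [h3, List.range_succ_eq_map, List.map_cons, List.map_map, List.map_map]
  refine congrArg₂ _ (by norm_num) ?_
  apply List.map_congr_left
  intro k _
  simp [Function.comp]
  ring

lemma mem_pyRange2_nonneg (n : Nat) (i : Int) (hi : i ∈ PySem.List.pyRange 0 (n : Int) 2) :
    0 ≤ i := by
  rw [pyRange2] at hi
  obtain ⟨k, -, rfl⟩ := List.mem_map.mp hi
  positivity

lemma mergeFold_char (cnt : PySem.Dict Int Int) :
    ∀ (a : List Int), a.length % 2 = 0 → ∀ (s : PySem.Set Int),
    (PySem.List.pyRange 0 (a.length : Int) 2).foldl (pvMergeStep cnt) (a, s)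
      = (pvMergeR a (fun v => cnt.getD v 0) s, pvSeenR a s)
  | [], _, s => by
    rw [show (([] : List Int).length : Int) = ((0 : Nat) : Int) from rfl, pyRange2]
    rfl
  | [x], h, s => by simp at h
  | x :: y :: t, h, s => by
    have ht : t.length % 2 = 0 := by simp [List.length_cons] at h; omega
    have hlen : (((x :: y :: t) : List Int).length : Int) = (t.length : Int) + 2 := by
      simp [List.length_cons]; ring
    rw [hlen, pyRange2_cons, List.foldl_cons]
    have hv : PySem.List.pyGetD (x :: y :: t) 0 0 = x := PySem.List.pyGetD_zero_cons x (y :: t) 0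
    by_cases hc : x ∈ s
    · have hstep : pvMergeStep cnt (x :: y :: t, s) 0 = (x :: y :: t, s) := by
        simp [pvMergeStep, hv, hc]
      rw [hstep, mergeFold_shift cnt _ (mem_pyRange2_nonneg t.length) x y t s,
        mergeFold_char cnt t ht s]
      simp [pvMergeR, pvSeenR, hc]
    · have hstep : pvMergeStep cnt (x :: y :: t, s) 0
          = (x :: (y + cnt.getD x 0) :: t, PySem.Set.add s x) := by
        simp only [pvMergeStep, hv]
        rw [show (0 : Int) + 1 = ((1 : Nat) : Int) from by norm_num,
          PySem.List.pySetD_natCast, PySem.List.pyGetD_natCast]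
        simp [hc]
      rw [hstep, mergeFold_shift cnt _ (mem_pyRange2_nonneg t.length) x _ t _,
        mergeFold_char cnt t ht (PySem.Set.add s x)]
      simp [pvMergeR, pvSeenR, hc]

lemma newFold_char (cnt : PySem.Dict Int Int) :
    ∀ (xs l : List Int) (s : PySem.Set Int),
    (xs.foldl (pvNewStep cnt) (l, s)).1 = l ++ pvNewR xs (fun v => cnt.getD v 0) s
  | [], l, s => by simp [pvNewR]
  | x :: xs, l, s => by
    rw [List.foldl_cons]
    by_cases hc : x ∈ s
    · have hstep : pvNewStep cnt (l, s) x = (l, s) := by simp [pvNewStep, hc]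
      rw [hstep, newFold_char cnt xs l s]
      simp [pvNewR, hc]
    · have hcb : s.contains x = false := by
        cases hcc : s.contains x
        · rfl
        · exact absurd ((PySem.Set.contains_iff s x).mp hcc) hc
      have hstep : pvNewStep cnt (l, s) x = (l ++ [x, cnt.getD x 0], PySem.Set.add s x) := by
        simp [pvNewStep, hc]
      rw [hstep, newFold_char cnt xs _ _]
      simp [pvNewR, hc]

lemma altB_char (arr argv : List Int) (h : arr.length % 2 = 0) :
    zapisz_alt arr argv
      = pvMergeR arr (pvFC argv) PySem.Set.empty
        ++ pvNewR argv (pvFC argv) (pvSeenR arr PySem.Set.empty) := by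
  have hfc : (fun v => (pvCnt argv).getD v 0) = pvFC argv := funext (pvCnt_getD argv)
  show (argv.foldl (pvNewStep (pvCnt argv))
      ((PySem.List.pyRange 0 (arr.length : Int) 2).foldl (pvMergeStep (pvCnt argv))
        (arr, PySem.Set.empty))).1 = _
  rw [mergeFold_char (pvCnt argv) arr h PySem.Set.empty,
    newFold_char (pvCnt argv) argv _ _, hfc]

-- ---- bookkeeping lemmas on the model ----

lemma length_pvInc : ∀ (a : List Int) (n : Int), (pvInc a n).length = a.length
  | [], _ => rfl
  | [x], _ => rfl
  | x :: y :: t, n => by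
    by_cases hx : x = n <;> simp [pvInc, hx, length_pvInc t n]

lemma seenR_pvInc : ∀ (a : List Int) (n : Int) (s : PySem.Set Int),
    pvSeenR (pvInc a n) s = pvSeenR a s
  | [], _, _ => rfl
  | [x], _, _ => rfl
  | x :: y :: t, n, s => by
    by_cases hx : x = n <;> simp [pvInc, hx, pvSeenR, seenR_pvInc t n]

lemma mem_seenR : ∀ (a : List Int), a.length % 2 = 0 → ∀ (s : PySem.Set Int) (n : Int),
    n ∈ pvSeenR a s ↔ n ∈ s ∨ n ∈ every2 a
  | [], _, s, n => by simp [pvSeenR, every2]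
  | [x], h, s, n => by simp at h
  | x :: y :: t, h, s, n => by
    have ht : t.length % 2 = 0 := by simp [List.length_cons] at h; omega
    by_cases hc : x ∈ s
    · have hcb := (PySem.Set.contains_iff s x).mpr hc
      rw [show pvSeenR (x :: y :: t) s = pvSeenR t (if s.contains x then s else PySem.Set.add s x) from rfl]
      rw [hcb, if_pos rfl, mem_seenR t ht s n]
      simp only [every2, List.mem_cons]
      constructor
      · rintro (h1 | h1)
        · exact Or.inl h1
        · exact Or.inr (Or.inr h1)
      · rintro (h1 | h1 | h1)
        · exact Or.inl h1
        · exact Or.inl (h1 ▸ hc)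
        · exact Or.inr h1
    · have hcb : s.contains x = false := by
        cases hcc : s.contains x
        · rfl
        · exact absurd ((PySem.Set.contains_iff s x).mp hcc) hc
      rw [show pvSeenR (x :: y :: t) s = pvSeenR t (if s.contains x then s else PySem.Set.add s x) from rfl]
      rw [hcb]
      simp only [Bool.false_eq_true, if_false]
      rw [mem_seenR t ht _ n, PySem.Set.mem_add]
      simp only [every2, List.mem_cons]
      tauto

lemma seenR_append : ∀ (a : List Int), a.length % 2 = 0 → ∀ (s : PySem.Set Int) (n c : Int),
    n ∉ pvSeenR a s → pvSeenR (a ++ [n, c]) s = PySem.Set.add (pvSeenR a s) n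
  | [], _, s, n, c, hn => by
    have hn' : n ∉ s := hn
    simp [pvSeenR, hn']
  | [x], h, _, _, _, _ => by simp at h
  | x :: y :: t, h, s, n, c, hn => by
    have ht : t.length % 2 = 0 := by simp [List.length_cons] at h; omega
    show pvSeenR (t ++ [n, c]) _ = _
    exact seenR_append t ht _ n c hn

lemma mergeR_congr : ∀ (a : List Int) (f g : Int → Int) (s : PySem.Set Int),
    (∀ v, v ∈ every2 a → v ∉ s → f v = g v) → pvMergeR a f s = pvMergeR a g s
  | [], _, _, _, _ => rfl
  | [x], _, _, _, _ => rfl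
  | x :: y :: t, f, g, s, hfg => by
    by_cases hc : x ∈ s
    · have h2 : ∀ (u : List Int) (g2 : Int → Int), pvMergeR (x :: y :: u) g2 s
          = x :: y :: pvMergeR u g2 s := fun u g2 => by simp [pvMergeR, hc]
      rw [h2, h2, mergeR_congr t f g s (fun v hv hvs => hfg v (List.mem_cons_of_mem _ hv) hvs)]
    · have h2 : ∀ (u : List Int) (g2 : Int → Int), pvMergeR (x :: y :: u) g2 s
          = x :: (y + g2 x) :: pvMergeR u g2 (PySem.Set.add s x) := fun u g2 => by
        simp [pvMergeR, hc]
      rw [h2, h2, hfg x (by simp [every2]) hc,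
        mergeR_congr t f g (PySem.Set.add s x) (fun v hv hvs =>
          hfg v (List.mem_cons_of_mem _ hv)
            (fun hmem => hvs ((PySem.Set.mem_add s x v).mpr (Or.inl hmem))))]

lemma newR_congr : ∀ (xs : List Int) (f g : Int → Int) (s : PySem.Set Int),
    (∀ v, v ∈ xs → v ∉ s → f v = g v) → pvNewR xs f s = pvNewR xs g s
  | [], _, _, _, _ => rfl
  | x :: xs, f, g, s, hfg => by
    by_cases hc : x ∈ s
    · have h2 : ∀ (g2 : Int → Int), pvNewR (x :: xs) g2 s
          = pvNewR xs g2 s := fun g2 => by simp [pvNewR, hc]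
      rw [h2, h2, newR_congr xs f g s (fun v hv hvs => hfg v (List.mem_cons_of_mem _ hv) hvs)]
    · have h2 : ∀ (g2 : Int → Int), pvNewR (x :: xs) g2 s
          = x :: g2 x :: pvNewR xs g2 (PySem.Set.add s x) := fun g2 => by
        simp [pvNewR, hc]
      rw [h2, h2, hfg x List.mem_cons_self hc,
        newR_congr xs f g (PySem.Set.add s x) (fun v hv hvs =>
          hfg v (List.mem_cons_of_mem _ hv)
            (fun hmem => hvs ((PySem.Set.mem_add s x v).mpr (Or.inl hmem))))]

lemma mergeR_zero : ∀ (a : List Int), a.length % 2 = 0 → ∀ (s : PySem.Set Int),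
    pvMergeR a (fun _ => (0 : Int)) s = a
  | [], _, _ => rfl
  | [x], h, _ => by simp at h
  | x :: y :: t, h, s => by
    have ht : t.length % 2 = 0 := by simp [List.length_cons] at h; omega
    by_cases hc : x ∈ s
    · simp [pvMergeR, hc, mergeR_zero t ht]
    · simp [pvMergeR, hc, mergeR_zero t ht]

lemma mergeR_pvInc : ∀ (a : List Int) (f : Int → Int) (s : PySem.Set Int) (n : Int),
    n ∈ every2 a → n ∉ s →
    pvMergeR (pvInc a n) f s = pvMergeR a (fun v => if v = n then f v + 1 else f v) s
  | [], _, _, _, hm, _ => by simp [every2] at hm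
  | [x], _, _, _, _, _ => rfl
  | x :: y :: t, f, s, n, hm, hs => by
    have hcbn : s.contains n = false := by
      cases hcc : s.contains n
      · rfl
      · exact absurd ((PySem.Set.contains_iff s n).mp hcc) hs
    by_cases hx : x = n
    · subst hx
      have h1 : pvInc (x :: y :: t) x = x :: (y + 1) :: t := by simp [pvInc]
      have h2 : pvMergeR (x :: (y + 1) :: t) f s
          = x :: (y + 1 + f x) :: pvMergeR t f (PySem.Set.add s x) := by
        simp [pvMergeR, hs]
      have h3 : pvMergeR (x :: y :: t) (fun v => if v = x then f v + 1 else f v) s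
          = x :: (y + (f x + 1))
              :: pvMergeR t (fun v => if v = x then f v + 1 else f v) (PySem.Set.add s x) := by
        simp [pvMergeR, hs]
      rw [h1, h2, h3]
      refine congrArg₂ _ rfl (congrArg₂ _ (by ring) ?_)
      exact mergeR_congr t f _ _ (fun v _ hvs => by
        have hvn : v ≠ x := fun e => hvs ((PySem.Set.mem_add s x v).mpr (Or.inr e))
        simp [hvn])
    · have hm' : n ∈ every2 t := by
        rcases (List.mem_cons.mp (show n ∈ x :: every2 t from hm)) with h1 | h1
        · exact absurd h1.symm hx
        · exact h1
      have h1 : pvInc (x :: y :: t) n = x :: y :: pvInc t n := by simp [pvInc, hx]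
      rw [h1]
      by_cases hc : x ∈ s
      · have h2 : ∀ (u : List Int) (g : Int → Int), pvMergeR (x :: y :: u) g s
            = x :: y :: pvMergeR u g s := fun u g => by simp [pvMergeR, hc]
        rw [h2, h2, mergeR_pvInc t f s n hm' hs]
      · have hs' : n ∉ PySem.Set.add s x := fun hmem => by
          rcases (PySem.Set.mem_add s x n).mp hmem with h1 | h1
          · exact hs h1
          · exact hx h1.symm
        have h2 : ∀ (u : List Int) (g : Int → Int), pvMergeR (x :: y :: u) g s
            = x :: (y + g x) :: pvMergeR u g (PySem.Set.add s x) := fun u g => by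
          simp [pvMergeR, hc]
        rw [h2, h2, mergeR_pvInc t f _ n hm' hs']
        simp [hx]

lemma mergeR_append : ∀ (a : List Int), a.length % 2 = 0 → ∀ (f : Int → Int) (s : PySem.Set Int) (n c : Int),
    n ∉ s → n ∉ every2 a →
    pvMergeR (a ++ [n, c]) f s = pvMergeR a f s ++ [n, c + f n]
  | [], _, f, s, n, c, hs, _ => by
    simp [pvMergeR, hs]
  | [x], h, _, _, _, _, _, _ => by simp at h
  | x :: y :: t, h, f, s, n, c, hs, hm => by
    have ht : t.length % 2 = 0 := by simp [List.length_cons] at h; omega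
    have hnx : n ≠ x := fun e => hm (e ▸ List.mem_cons_self)
    have hm' : n ∉ every2 t := fun h1 => hm (List.mem_cons_of_mem _ h1)
    show pvMergeR (x :: y :: (t ++ [n, c])) f s = _
    by_cases hc : x ∈ s
    · have h2 : ∀ (u : List Int), pvMergeR (x :: y :: u) f s
          = x :: y :: pvMergeR u f s := fun u => by simp [pvMergeR, hc]
      rw [h2, h2, mergeR_append t ht f s n c hs hm']
      rfl
    · have h2 : ∀ (u : List Int), pvMergeR (x :: y :: u) f s
          = x :: (y + f x) :: pvMergeR u f (PySem.Set.add s x) := fun u => by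
        simp [pvMergeR, hc]
      have hs' : n ∉ PySem.Set.add s x := fun hmem => by
        rcases (PySem.Set.mem_add s x n).mp hmem with h1 | h1
        · exact hs h1
        · exact hnx h1
      rw [h2, h2, mergeR_append t ht f _ n c hs' hm']
      rfl

-- ---- port A computes the model ----

lemma not_mem_empty (n : Int) : n ∉ (PySem.Set.empty : PySem.Set Int) := by
  intro h
  simp [PySem.Set.empty] at h

lemma foldA_char : ∀ (argv arr : List Int), arr.length % 2 = 0 →
    argv.foldl pvStepA arr
      = pvMergeR arr (pvFC argv) PySem.Set.empty
        ++ pvNewR argv (pvFC argv) (pvSeenR arr PySem.Set.empty)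
  | [], arr, h => by
    rw [List.foldl_nil,
      mergeR_congr arr (pvFC []) (fun _ => (0 : Int)) _ (fun v _ _ => by simp [pvFC]),
      mergeR_zero arr h]
    simp [pvNewR]
  | n :: rest, arr, h => by
    rw [List.foldl_cons, stepA_char arr h n]
    by_cases hm : n ∈ every2 arr
    · rw [if_pos hm]
      have h2 : (pvInc arr n).length % 2 = 0 := by rw [length_pvInc]; exact h
      rw [foldA_char rest (pvInc arr n) h2, seenR_pvInc arr n,
        mergeR_pvInc arr (pvFC rest) _ n hm (not_mem_empty n),
        mergeR_congr arr _ (pvFC (n :: rest)) _ (fun v _ _ => by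
          by_cases hv : v = n
          · simp [pvFC, List.count_cons, hv]
          · simp [pvFC, List.count_cons, hv, Ne.symm hv])]
      have hnS : n ∈ pvSeenR arr PySem.Set.empty := (mem_seenR arr h _ n).mpr (Or.inr hm)
      have hnS' : n ∈ pvSeenR arr ([] : PySem.Set Int) := hnS
      have hnew : pvNewR (n :: rest) (pvFC (n :: rest)) (pvSeenR arr PySem.Set.empty)
          = pvNewR rest (pvFC (n :: rest)) (pvSeenR arr PySem.Set.empty) := by
        simp [pvNewR, hnS']
      rw [hnew, newR_congr rest (pvFC rest) (pvFC (n :: rest)) _ (fun v _ hvs => by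
        have hvn : v ≠ n := fun e => hvs (e ▸ hnS)
        simp [pvFC, List.count_cons, hvn, Ne.symm hvn])]
    · rw [if_neg hm]
      have h2 : (arr ++ [n, 1]).length % 2 = 0 := by
        simp [List.length_append]; omega
      rw [foldA_char rest (arr ++ [n, 1]) h2]
      have hnS : n ∉ pvSeenR arr PySem.Set.empty := fun hc =>
        ((mem_seenR arr h _ n).mp hc).elim (not_mem_empty n) hm
      rw [mergeR_append arr h (pvFC rest) _ n 1 (not_mem_empty n) hm,
        seenR_append arr h _ n 1 hnS,
        mergeR_congr arr (pvFC rest) (pvFC (n :: rest)) _ (fun v hv _ => by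
          have hvn : v ≠ n := fun e => hm (e ▸ hv)
          simp [pvFC, List.count_cons, hvn, Ne.symm hvn]),
        newR_congr rest (pvFC rest) (pvFC (n :: rest)) _ (fun v _ hvs => by
          have hvn : v ≠ n := fun e =>
            hvs ((PySem.Set.mem_add _ n v).mpr (Or.inr e))
          simp [pvFC, List.count_cons, hvn, Ne.symm hvn])]
      have hrhs : pvNewR (n :: rest) (pvFC (n :: rest)) (pvSeenR arr PySem.Set.empty)
          = n :: pvFC (n :: rest) n
              :: pvNewR rest (pvFC (n :: rest)) (PySem.Set.add (pvSeenR arr PySem.Set.empty) n) := by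
        have hnS' : n ∉ pvSeenR arr ([] : PySem.Set Int) := hnS
        simp [pvNewR, hnS']
      rw [hrhs]
      have hfc : pvFC (n :: rest) n = 1 + pvFC rest n := by
        simp [pvFC, List.count_cons]; omega
      rw [hfc]
      simp

-- ===== VERDICT (by name: the statement is the Claim_ definition above) =====
theorem zapisz_spec : Claim_equal_zapisz := by
  intro arr argv _ hpre
  unfold Spec_zapisz zapisz
  rw [foldA_char argv arr hpre, altB_char arr argv hpre]
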